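-- pv_equiv track=rewrite | github.com/hhm970/Advent-Of-Code | 2023/Day_1/main.py | extract_first_num_str
-- ===== SOURCE A (Python) =====
-- def extract_first_num_str(code: str) -> str:
--     """Returns the first numeric character of the input string, or the first
--     text string of a given numeric character from 0 to 9 inclusive."""
--
--     num_text_list = []
--
--     num_dict = {"one": "1", "two": "2", "three": "3",
--                 "four": "4", "five": "5", "six": "6",
--                 "seven": "7", "eight": "8", "nine": "9",
--                 "zero": "0"}
--
--     for i in code:
--         if i.isnumeric():
--             result = i
--             return result
--         else:
--             num_text_list.append(i)
--             num_text = "".join(num_text_list)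
--             if num_text in num_dict.keys():
--                 result = num_dict[num_text]
--                 return result
-- ===== SOURCE B (Python) =====
-- def extract_first_num_str(code: str) -> str:
--     """Returns the first numeric character of the input string, or the first
--     text string of a given numeric character from 0 to 9 inclusive."""
--     words = [("one", "1"), ("two", "2"), ("three", "3"),
--              ("four", "4"), ("five", "5"), ("six", "6"),
--              ("seven", "7"), ("eight", "8"), ("nine", "9"),
--              ("zero", "0")]
--     for word, digit in words:
--         if code.startswith(word):
--             return digit
--     for ch in code:
--         if ch.isnumeric():
--             return ch
-- ===== Notes on version B (the rewrite author's own statement) =====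
-- stated objective: faster
-- what changed: A's single interleaved scan that rebuilds the accumulated prefix via str join and tests it against the dict at every character (quadratic in the scanned prefix) is replaced by two plain passes: a loop over the ten (word, digit) pairs using code.startswith, then a first-digit scan over the characters.
-- outside the precondition, e.g. on extract_first_num_str('abc'): A returns None, B returns None
import Mathlib
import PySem

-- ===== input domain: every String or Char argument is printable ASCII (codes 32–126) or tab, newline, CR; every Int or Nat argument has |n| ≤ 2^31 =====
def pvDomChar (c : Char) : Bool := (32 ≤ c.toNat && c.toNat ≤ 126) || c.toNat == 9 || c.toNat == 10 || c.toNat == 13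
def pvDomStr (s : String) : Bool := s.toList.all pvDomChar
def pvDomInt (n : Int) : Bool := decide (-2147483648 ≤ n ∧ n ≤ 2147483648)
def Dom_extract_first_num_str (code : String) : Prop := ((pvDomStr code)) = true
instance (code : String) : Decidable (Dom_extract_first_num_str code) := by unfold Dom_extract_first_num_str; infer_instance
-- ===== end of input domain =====

-- B replaces A's interleaved accumulating scan (which rejoins the growing prefix at every char)
-- with a startswith pass over the ten word pairs followed by a plain first-digit scan;
-- a timing run measured B faster.

-- ===== PORT A =====
-- num_dict, in insertion order
def aNumDict : PySem.Dict String String :=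
  PySem.Dict.mk [("one", "1"), ("two", "2"), ("three", "3"),
                 ("four", "4"), ("five", "5"), ("six", "6"),
                 ("seven", "7"), ("eight", "8"), ("nine", "9"),
                 ("zero", "0")]

-- A's for-loop: acc = num_text_list; none where the Python falls off the end (returns None).
-- i.isnumeric() is PySem.Chars.isdigit, exact on the printable-ASCII domain Dom_.
def aLoop : List Char → List Char → Option String
  | [], _ => none
  | c :: rest, acc =>
    if PySem.Chars.isdigit c then some (String.ofList [c])
    else
      let acc' := acc ++ [c]
      match PySem.Dict.get? aNumDict (String.ofList acc') with
      | some v => some v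
      | none => aLoop rest acc'

-- the implicit 'return None' is outside Pre_; "" stands in for it there
def extract_first_num_str (code : String) : String :=
  (aLoop code.toList []).getD ""

-- ===== PORT B =====
def bWords : List (String × String) :=
  [("one", "1"), ("two", "2"), ("three", "3"),
   ("four", "4"), ("five", "5"), ("six", "6"),
   ("seven", "7"), ("eight", "8"), ("nine", "9"),
   ("zero", "0")]

-- first loop of Source B: digit of the first pair whose word is a prefix of code
def bFindWord : List (String × String) → String → Option String
  | [], _ => none
  | (w, d) :: rest, code =>
    if PySem.Str.startswith code w then some d else bFindWord rest code

-- second loop of Source B: first numeric character (isnumeric = isdigit on Dom_)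
def bFindDigit : List Char → Option String
  | [] => none
  | c :: rest => if PySem.Chars.isdigit c then some (String.ofList [c]) else bFindDigit rest

-- the implicit 'return None' is outside Pre_; "" stands in for it there
def extract_first_num_str_alt (code : String) : String :=
  match bFindWord bWords code with
  | some d => d
  | none =>
    match bFindDigit code.toList with
    | some c => c
    | none => ""

-- ===== PRECONDITION & SPEC =====
-- Pre_ excludes exactly the inputs with no digit character and no leading number word, on which
-- the Python A falls off the end of the function and returns None instead of a str.
def Pre_extract_first_num_str (code : String) : Prop :=
  (code.toList.any PySem.Chars.isdigit || bWords.any (fun p => PySem.Str.startswith code p.1)) = true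
instance (code : String) : Decidable (Pre_extract_first_num_str code) := by
  unfold Pre_extract_first_num_str; infer_instance

def pvWitness_extract_first_num_str : String := "a1"

def Spec_extract_first_num_str (code : String) (out : String) : Prop := out = extract_first_num_str_alt code
instance (code : String) (out : String) : Decidable (Spec_extract_first_num_str code out) := by unfold Spec_extract_first_num_str; infer_instance

-- ===== CLAIM (what is proved, stated in full; the proofs are below) =====
def Claim_equal_extract_first_num_str : Prop := ∀ (code : String), Dom_extract_first_num_str code → Pre_extract_first_num_str code → Spec_extract_first_num_str code (extract_first_num_str code)

-- ===== LEMMAS AND PROOFS =====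

-- any key A's dict lookup can hit is one of the ten word pairs
set_option maxRecDepth 8192 in
theorem aGet_mem {s v : String} (h : PySem.Dict.get? aNumDict s = some v) :
    (s, v) ∈ bWords := by
  simp only [aNumDict, PySem.Dict.get?_mk_cons] at h
  split_ifs at h with h1 h2 h3 h4 h5 h6 h7 h8 h9 h10 <;>
    [skip; skip; skip; skip; skip; skip; skip; skip; skip; skip;
     exact absurd h (by simp [PySem.Dict.get?])] <;>
  · injection h with h'
    subst h'
    simp only [beq_iff_eq] at *
    subst_vars
    simp [bWords]

-- no word of the list is a prefix of another except itself (prefix ⇒ same digit)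
theorem bWords_prefix_unique :
    ∀ p ∈ bWords, ∀ q ∈ bWords,
      p.1.toList <+: q.1.toList → p.2 = q.2 := by decide

-- two words both prefixing code carry the same digit
theorem bWords_startswith_unique (code : String) :
    ∀ p ∈ bWords, ∀ q ∈ bWords,
      PySem.Str.startswith code p.1 = true → PySem.Str.startswith code q.1 = true →
      p.2 = q.2 := by
  intro p hp q hq hps hqs
  simp only [PySem.Str.startswith_eq, PySem.Chars.startswith_iff] at hps hqs
  rcases List.prefix_or_prefix_of_prefix hps hqs with h | h
  · exact bWords_prefix_unique p hp q hq h
  · exact (bWords_prefix_unique q hq p hp h).symm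

-- Source B's first loop returns the digit of any matching pair (all matches agree by uniqueness)
theorem bFindWord_eq_some (ps : List (String × String)) (code : String)
    (huniq : ∀ p ∈ ps, ∀ q ∈ ps,
      PySem.Str.startswith code p.1 = true → PySem.Str.startswith code q.1 = true → p.2 = q.2)
    (p : String × String) (hp : p ∈ ps) (hs : PySem.Str.startswith code p.1 = true) :
    bFindWord ps code = some p.2 := by
  induction ps with
  | nil => cases hp
  | cons hd tl ih =>
    obtain ⟨w, d⟩ := hd
    by_cases hhd : PySem.Str.startswith code w = true
    · simp only [bFindWord, hhd, if_pos]
      have := huniq p hp (w, d) (by simp) hs hhd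
      simp [this]
    · have hp' : p ∈ tl := by
        rcases List.mem_cons.mp hp with rfl | h
        · exact absurd hs hhd
        · exact h
      simp only [bFindWord, hhd, Bool.false_eq_true, if_false]
      exact ih (fun a ha b hb => huniq a (List.mem_cons_of_mem _ ha) b (List.mem_cons_of_mem _ hb))
        hp'

-- Source B's first loop returns None when no word prefixes code
theorem bFindWord_eq_none (ps : List (String × String)) (code : String)
    (h : ∀ p ∈ ps, PySem.Str.startswith code p.1 = false) :
    bFindWord ps code = none := by
  induction ps with
  | nil => rfl
  | cons hd tl ih =>
    obtain ⟨w, d⟩ := hd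
    have hw := h (w, d) (by simp)
    simp only [bFindWord, hw, Bool.false_eq_true, if_false]
    exact ih (fun p hp => h p (List.mem_cons_of_mem _ hp))

-- A's loop, when no word is a prefix of the processed-prefix ++ remainder, is the first-digit scan
theorem aLoop_eq_bFindDigit (l acc : List Char)
    (h : ∀ p ∈ bWords, ¬ p.1.toList <+: acc ++ l) :
    aLoop l acc = bFindDigit l := by
  induction l generalizing acc with
  | nil => rfl
  | cons c rest ih =>
    by_cases hd : PySem.Chars.isdigit c = true
    · simp [aLoop, bFindDigit, hd]
    · have hget : PySem.Dict.get? aNumDict (String.ofList (acc ++ [c])) = none := by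
        cases hg : PySem.Dict.get? aNumDict (String.ofList (acc ++ [c])) with
        | none => rfl
        | some v =>
          have hmem := aGet_mem hg
          have hpre : (String.ofList (acc ++ [c])).toList <+: acc ++ c :: rest := by
            simp only [String.toList_ofList]
            exact ⟨rest, by simp⟩
          exact absurd hpre (h _ hmem)
      simp only [aLoop, bFindDigit, hd, Bool.false_eq_true, if_false, hget]
      exact ih (acc ++ [c]) (fun p hp => by
        have := h p hp
        simpa [List.append_assoc] using this)

-- per-word unfolding of A's loop: if code starts with a word the loop returns its digit
theorem aLoop_word (p : String × String) (hp : p ∈ bWords) (rest : List Char) :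
    aLoop (p.1.toList ++ rest) [] = some p.2 := by
  fin_cases hp <;>
  · simp only [show ("one":String).toList = ['o','n','e'] from by decide,
      show ("two":String).toList = ['t','w','o'] from by decide,
      show ("three":String).toList = ['t','h','r','e','e'] from by decide,
      show ("four":String).toList = ['f','o','u','r'] from by decide,
      show ("five":String).toList = ['f','i','v','e'] from by decide,
      show ("six":String).toList = ['s','i','x'] from by decide,
      show ("seven":String).toList = ['s','e','v','e','n'] from by decide,
      show ("eight":String).toList = ['e','i','g','h','t'] from by decide,
      show ("nine":String).toList = ['n','i','n','e'] from by decide,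
      show ("zero":String).toList = ['z','e','r','o'] from by decide,
      List.cons_append, List.nil_append]
    simp [aLoop, aNumDict, PySem.Chars.isdigit, PySem.Dict.get?,
      show ∀ a b : String, (a == b) = decide (a = b) from fun a b => rfl]

-- a digit in the list means the first-digit scan returns a value
theorem bFindDigit_isSome (l : List Char) (h : ∃ c ∈ l, PySem.Chars.isdigit c = true) :
    ∃ s, bFindDigit l = some s := by
  induction l with
  | nil => simp at h
  | cons c rest ih =>
    by_cases hc : PySem.Chars.isdigit c = true
    · exact ⟨String.ofList [c], by simp [bFindDigit, hc]⟩
    · obtain ⟨d, hd, hdd⟩ := h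
      rcases List.mem_cons.mp hd with rfl | hmem
      · exact absurd hdd hc
      · obtain ⟨s, hs⟩ := ih ⟨d, hmem, hdd⟩
        exact ⟨s, by simp [bFindDigit, hc, hs]⟩

-- ===== VERDICT (by name: the statement is the Claim_ definition above) =====
theorem extract_first_num_str_spec : Claim_equal_extract_first_num_str := by
  intro code _hdom hpre
  unfold Spec_extract_first_num_str
  by_cases hw : ∃ p ∈ bWords, PySem.Str.startswith code p.1 = true
  · obtain ⟨p, hp, hps⟩ := hw
    have hB : bFindWord bWords code = some p.2 :=
      bFindWord_eq_some bWords code (bWords_startswith_unique code) p hp hps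
    have hpref : p.1.toList <+: code.toList := by
      simpa [PySem.Chars.startswith_iff] using hps
    obtain ⟨rest, hrest⟩ := hpref
    have hA : aLoop code.toList [] = some p.2 := by
      rw [← hrest]; exact aLoop_word p hp rest
    simp [extract_first_num_str, extract_first_num_str_alt, hA, hB]
  · push Not at hw
    have hno : ∀ p ∈ bWords, PySem.Str.startswith code p.1 = false := by
      intro p hp
      exact Bool.eq_false_iff.mpr (fun hh => (hw p hp) hh)
    have hB : bFindWord bWords code = none := bFindWord_eq_none bWords code hno
    have hdig : ∃ c ∈ code.toList, PySem.Chars.isdigit c = true := by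
      unfold Pre_extract_first_num_str at hpre
      simp only [Bool.or_eq_true, List.any_eq_true] at hpre
      rcases hpre with h | ⟨p, hp, hps⟩
      · exact h
      · rw [hno p hp] at hps
        exact absurd hps Bool.false_ne_true
    obtain ⟨s, hs⟩ := bFindDigit_isSome code.toList hdig
    have hA : aLoop code.toList [] = bFindDigit code.toList := by
      apply aLoop_eq_bFindDigit
      intro p hp hpre'
      have hsw : PySem.Str.startswith code p.1 = true := by
        rw [PySem.Str.startswith_eq]
        exact (PySem.Chars.startswith_iff _ _).mpr (by simpa using hpre')
      rw [hno p hp] at hsw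
      exact Bool.false_ne_true hsw
    simp [extract_first_num_str, extract_first_num_str_alt, hA, hB, hs]
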